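-- pv_equiv track=rewrite | github.com/jangchangwan/TIL | docs/08_programmers/방금그곡/s1.py | change_score
-- ===== SOURCE A (Python) =====
-- music_score = {
--     'A': 'a', 'A#': 'b', 'B': 'c', 'C': 'd',
--     'C#': 'e', 'D': 'f', 'D#': 'g', 'E': 'h',
--     'F': 'i', 'F#': 'j', 'G': 'k', 'G#': 'm',
-- }
--
-- def change_score(data):
--     res = ''
--     i = 0
--     while i < len(data):
--         if (i+1) < len(data) and data[i+1] == '#':
--             # 딕셔너리에서 값을 못찾을 경우
--             if music_score.get(data[i:i+2]) == None:
--                 res += 'Z' # 연관없는 단어 넣어주기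
--             else:
--                 res += music_score[data[i:i+2]]
--             i += 2
--         else:
--             res += music_score[data[i]]
--             i += 1
--     return res
-- ===== SOURCE B (Python) =====
-- PLAIN = {'A': 'a', 'B': 'c', 'C': 'd', 'D': 'f', 'E': 'h', 'F': 'i', 'G': 'k'}
-- SHARP = {'A': 'b', 'C': 'e', 'D': 'g', 'F': 'j', 'G': 'm'}
--
-- def change_score(data):
--     out = []
--     pending = None
--     for ch in data:
--         if ch == '#' and pending is not None:
--             out.append(SHARP.get(pending, 'Z'))
--             pending = None
--         else:
--             if pending is not None:
--                 out.append(PLAIN[pending])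
--             pending = ch
--     if pending is not None:
--         out.append(PLAIN[pending])
--     return ''.join(out)
-- ===== Notes on version B (the rewrite author's own statement) =====
-- stated objective: alternative
-- what changed: Replaces the index-based two-character lookahead walk with a single character-wise pass that carries one pending note and flushes it when a '#' or a new note arrives, using two char-keyed maps instead of the mixed-key dict.
import Mathlib
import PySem

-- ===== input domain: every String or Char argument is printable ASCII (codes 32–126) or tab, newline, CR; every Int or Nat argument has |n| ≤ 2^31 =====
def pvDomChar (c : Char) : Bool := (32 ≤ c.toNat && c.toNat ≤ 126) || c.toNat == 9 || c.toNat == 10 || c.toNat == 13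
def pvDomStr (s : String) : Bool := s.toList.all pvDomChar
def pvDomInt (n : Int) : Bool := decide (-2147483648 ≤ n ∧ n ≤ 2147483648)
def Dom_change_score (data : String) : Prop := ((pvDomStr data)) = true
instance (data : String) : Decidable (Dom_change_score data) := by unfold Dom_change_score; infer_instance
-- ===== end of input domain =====

-- B replaces A's index-based two-character lookahead walk by a single char-wise pass
-- carrying one pending note, with two char-keyed maps (objective: alternative structure).

-- ===== PORT A =====
-- the module-level dict music_score
def music_score : PySem.Dict String String :=
  PySem.Dict.mk [("A", "a"), ("A#", "b"), ("B", "c"), ("C", "d"),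
                 ("C#", "e"), ("D", "f"), ("D#", "g"), ("E", "h"),
                 ("F", "i"), ("F#", "j"), ("G", "k"), ("G#", "m")]

-- res += music_score[data[i]]; a missing key is a Python KeyError (excluded by Pre_),
-- the port appends "" there
def plainA (c : Char) : String := (music_score.get? (String.ofList [c])).getD ""

-- the 'if music_score.get(data[i:i+2]) == None: res += 'Z' else: …' branch
def tokA (c h : Char) : String :=
  match music_score.get? (String.ofList [c, h]) with
  | none => "Z"
  | some v => v

-- the while loop over index i, transcribed as recursion on the suffix data[i:]
-- (i advances by 2 when data[i+1] == '#', else by 1)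
def goA : List Char → String → String
  | [], res => res
  | [c], res => res ++ plainA c
  | c :: h :: rest, res =>
      if h = '#' then goA rest (res ++ tokA c h)
      else goA (h :: rest) (res ++ plainA c)

def change_score (data : String) : String := goA data.toList ""

-- ===== PORT B =====
def PLAIN : PySem.Dict Char String :=
  PySem.Dict.mk [('A', "a"), ('B', "c"), ('C', "d"), ('D', "f"),
                 ('E', "h"), ('F', "i"), ('G', "k")]

def SHARP : PySem.Dict Char String :=
  PySem.Dict.mk [('A', "b"), ('C', "e"), ('D', "g"), ('F', "j"), ('G', "m")]

-- 'out.append(PLAIN[pending])': KeyError (excluded by Pre_) ports as appending ""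
def plainB (c : Char) : String := (PLAIN.get? c).getD ""

-- one step of the for-loop over data's characters, state (out, pending)
def stepB (st : String × Option Char) (ch : Char) : String × Option Char :=
  match st with
  | (out, some p) =>
      if ch = '#' then (out ++ SHARP.getD p "Z", none)
      else (out ++ plainB p, some ch)
  | (out, none) => (out, some ch)

-- the final 'if pending is not None: out.append(PLAIN[pending])'
def finishB (st : String × Option Char) : String :=
  match st with
  | (out, some p) => out ++ plainB p
  | (out, none) => out

def change_score_alt (data : String) : String :=
  finishB (data.toList.foldl stepB ("", none))

-- ===== PRECONDITION & SPEC =====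
-- Pre_ excludes exactly the inputs on which Python A raises KeyError: every character
-- that does not have a sharp sign right after it must be one of the seven plain note
-- letters A..G (there both Pythons raise KeyError).
def goodNotes : List Char → Bool
  | [] => true
  | _ :: '#' :: rest => goodNotes rest
  | c :: rest => (c ∈ ['A', 'B', 'C', 'D', 'E', 'F', 'G'] : Bool) && goodNotes rest

def Pre_change_score (data : String) : Prop := goodNotes data.toList = true
instance (data : String) : Decidable (Pre_change_score data) := by
  unfold Pre_change_score; infer_instance

def pvWitness_change_score : String := "A#BC#D"

def Spec_change_score (data : String) (out : String) : Prop := out = change_score_alt data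
instance (data : String) (out : String) : Decidable (Spec_change_score data out) := by
  unfold Spec_change_score; infer_instance

-- ===== CLAIM (what is proved, stated in full; the proofs are below) =====
def Claim_equal_change_score : Prop :=
  ∀ (data : String), Dom_change_score data → Pre_change_score data →
    Spec_change_score data (change_score data)

-- ===== LEMMAS AND PROOFS =====

-- a string-literal key never matches a differing char list (used to kill dead lookup branches)
theorem beq_ofList_false (k : String) (l : List Char) (h : k.toList ≠ l) :
    (k == String.ofList l) = false := by
  simp [beq_eq_false_iff_ne, ← String.toList_inj, h]

-- a char-literal key differs from c
theorem beq_char_false (a c : Char) (h : ¬ c = a) : (a == c) = false := by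
  simp [beq_eq_false_iff_ne]; exact fun g => h g.symm

-- the two-char dict lookup of A agrees with B's SHARP.getD … "Z" on every first char
theorem tokA_eq_sharp (c : Char) : tokA c '#' = SHARP.getD c "Z" := by
  by_cases hA : c = 'A'; · subst hA; decide
  by_cases hC : c = 'C'; · subst hC; decide
  by_cases hD : c = 'D'; · subst hD; decide
  by_cases hF : c = 'F'; · subst hF; decide
  by_cases hG : c = 'G'; · subst hG; decide
  simp [tokA, SHARP, music_score, PySem.Dict.get?, PySem.Dict.getD, List.find?,
    beq_ofList_false "A" [c, '#'] (by simp [show ("A" : String).toList = ['A'] from rfl]),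
    beq_ofList_false "A#" [c, '#'] (by simp [show ("A#" : String).toList = ['A', '#'] from rfl]; exact fun g => hA g.symm),
    beq_ofList_false "B" [c, '#'] (by simp [show ("B" : String).toList = ['B'] from rfl]),
    beq_ofList_false "C" [c, '#'] (by simp [show ("C" : String).toList = ['C'] from rfl]),
    beq_ofList_false "C#" [c, '#'] (by simp [show ("C#" : String).toList = ['C', '#'] from rfl]; exact fun g => hC g.symm),
    beq_ofList_false "D" [c, '#'] (by simp [show ("D" : String).toList = ['D'] from rfl]),
    beq_ofList_false "D#" [c, '#'] (by simp [show ("D#" : String).toList = ['D', '#'] from rfl]; exact fun g => hD g.symm),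
    beq_ofList_false "E" [c, '#'] (by simp [show ("E" : String).toList = ['E'] from rfl]),
    beq_ofList_false "F" [c, '#'] (by simp [show ("F" : String).toList = ['F'] from rfl]),
    beq_ofList_false "F#" [c, '#'] (by simp [show ("F#" : String).toList = ['F', '#'] from rfl]; exact fun g => hF g.symm),
    beq_ofList_false "G" [c, '#'] (by simp [show ("G" : String).toList = ['G'] from rfl]),
    beq_ofList_false "G#" [c, '#'] (by simp [show ("G#" : String).toList = ['G', '#'] from rfl]; exact fun g => hG g.symm),
    beq_char_false 'A' c hA, beq_char_false 'C' c hC, beq_char_false 'D' c hD,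
    beq_char_false 'F' c hF, beq_char_false 'G' c hG]

theorem plainA_eq_plainB (c : Char) : plainA c = plainB c := by
  by_cases hA : c = 'A'; · subst hA; decide
  by_cases hB : c = 'B'; · subst hB; decide
  by_cases hC : c = 'C'; · subst hC; decide
  by_cases hD : c = 'D'; · subst hD; decide
  by_cases hE : c = 'E'; · subst hE; decide
  by_cases hF : c = 'F'; · subst hF; decide
  by_cases hG : c = 'G'; · subst hG; decide
  simp [plainA, plainB, PLAIN, music_score, PySem.Dict.get?, List.find?,
    beq_ofList_false "A" [c] (by simp [show ("A" : String).toList = ['A'] from rfl]; exact fun g => hA g.symm),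
    beq_ofList_false "A#" [c] (by simp [show ("A#" : String).toList = ['A', '#'] from rfl]),
    beq_ofList_false "B" [c] (by simp [show ("B" : String).toList = ['B'] from rfl]; exact fun g => hB g.symm),
    beq_ofList_false "C" [c] (by simp [show ("C" : String).toList = ['C'] from rfl]; exact fun g => hC g.symm),
    beq_ofList_false "C#" [c] (by simp [show ("C#" : String).toList = ['C', '#'] from rfl]),
    beq_ofList_false "D" [c] (by simp [show ("D" : String).toList = ['D'] from rfl]; exact fun g => hD g.symm),
    beq_ofList_false "D#" [c] (by simp [show ("D#" : String).toList = ['D', '#'] from rfl]),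
    beq_ofList_false "E" [c] (by simp [show ("E" : String).toList = ['E'] from rfl]; exact fun g => hE g.symm),
    beq_ofList_false "F" [c] (by simp [show ("F" : String).toList = ['F'] from rfl]; exact fun g => hF g.symm),
    beq_ofList_false "F#" [c] (by simp [show ("F#" : String).toList = ['F', '#'] from rfl]),
    beq_ofList_false "G" [c] (by simp [show ("G" : String).toList = ['G'] from rfl]; exact fun g => hG g.symm),
    beq_ofList_false "G#" [c] (by simp [show ("G#" : String).toList = ['G', '#'] from rfl]),
    beq_char_false 'A' c hA, beq_char_false 'B' c hB, beq_char_false 'C' c hC,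
    beq_char_false 'D' c hD, beq_char_false 'E' c hE, beq_char_false 'F' c hF,
    beq_char_false 'G' c hG]

-- main invariant: A's walk equals B's fold started with no pending note
theorem goA_eq_fold (cs : List Char) (res : String) :
    goA cs res = finishB (cs.foldl stepB (res, none)) := by
  induction cs, res using goA.induct with
  | case1 res => simp [goA, finishB]
  | case2 c res => simp [goA, finishB, stepB, plainA_eq_plainB]
  | case3 c rest res ih =>
      simp only [goA, List.foldl_cons]
      rw [ih]
      simp [stepB, tokA_eq_sharp]
  | case4 c h rest res hsharp ih =>
      simp only [goA, if_neg hsharp, List.foldl_cons]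
      rw [ih]
      simp [stepB, hsharp, plainA_eq_plainB]

-- ===== VERDICT (by name: the statement is the Claim_ definition above) =====
theorem change_score_spec : Claim_equal_change_score := by
  intro data _ _
  show change_score data = change_score_alt data
  simp [change_score, change_score_alt, goA_eq_fold]
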